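-- pv_equiv track=rewrite | github.com/pypdfium2-team/pypdfium2 | src/pypdfium2/_helpers.py | _colour_as_hex
-- ===== SOURCE A (Python) =====
-- def _hex_digits(c):
--
--     hxc = hex(c)[2:]
--     if len(hxc) == 1:
--         hxc = "0" + hxc
--
--     return hxc
--
-- def _colour_as_hex(r, g, b, a=255) -> int:
--     """
--     Convert a colour given as integers of ``red, green, blue, alpha`` ranging from 0 to 255
--     to a single value in 8888 ARGB format.
--     """
--
--     colours = (a, r, g, b)
--
--     for c in colours:
--         assert isinstance(c, int)
--         assert 0 <= c <= 255
--
--     hxc_str = "0x"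
--     for c in colours:
--         hxc_str += _hex_digits(c)
--
--     hxc_int = int(hxc_str, 0)
--
--     return hxc_int
-- ===== SOURCE B (Python) =====
-- def _colour_as_hex(r, g, b, a=255) -> int:
--     for c in (a, r, g, b):
--         assert isinstance(c, int)
--         assert 0 <= c <= 255
--     return ((a * 256 + r) * 256 + g) * 256 + b
-- ===== Notes on version B (the rewrite author's own statement) =====
-- stated objective: simpler
-- what changed: B keeps the validation loop but replaces the hex-string assembly (per-byte hex(), zero-padding, concatenation, int(s, 0) re-parse) with a direct arithmetic Horner packing ((a*256+r)*256+g)*256+b.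
import Mathlib
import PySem

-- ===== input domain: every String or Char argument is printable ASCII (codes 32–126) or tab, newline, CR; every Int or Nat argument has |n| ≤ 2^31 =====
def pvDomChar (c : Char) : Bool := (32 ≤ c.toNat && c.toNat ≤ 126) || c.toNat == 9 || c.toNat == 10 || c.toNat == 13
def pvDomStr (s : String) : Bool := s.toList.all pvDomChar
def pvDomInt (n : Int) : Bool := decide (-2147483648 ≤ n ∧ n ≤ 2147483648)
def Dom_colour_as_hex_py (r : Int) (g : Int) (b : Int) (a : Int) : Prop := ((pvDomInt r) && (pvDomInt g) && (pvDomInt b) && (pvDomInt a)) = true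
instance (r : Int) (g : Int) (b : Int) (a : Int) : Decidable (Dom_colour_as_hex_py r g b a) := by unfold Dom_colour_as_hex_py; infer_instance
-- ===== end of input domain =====

-- B replaces A's per-byte hex-string assembly and int(s, 0) re-parse with direct Horner
-- arithmetic packing; same return value on all in-range inputs (objective: simpler).

-- ===== PORT A =====
-- value of a lowercase hex digit character, as used by int(s, 16)/int(s, 0);
-- exact for the characters '0'-'9' and 'a'-'f' that hex() produces
def pvHexVal (ch : Char) : Int :=
  if ch.toNat ≤ 57 then (ch.toNat : Int) - 48 else (ch.toNat : Int) - 87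

-- int(s, 0) on a string of the form "0x<lowercase hex digits>": drop the "0x"
-- prefix and fold the digit values; exact on exactly the strings A builds
def pvIntBase0Hex (cs : List Char) : Int :=
  (cs.drop 2).foldl (fun acc ch => acc * 16 + pvHexVal ch) 0

-- _hex_digits: hex(c)[2:] (via Nat.toDigits 16, which matches hex() for c ≥ 0:
-- lowercase digits, no leading zeros, "0" for 0), left-padded to two chars
def hex_digits_py (c : Int) : List Char :=
  let hxc := Nat.toDigits 16 c.toNat
  if hxc.length = 1 then '0' :: hxc else hxc

def colour_as_hex_py (r : Int) (g : Int) (b : Int) (a : Int) : Int :=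
  let colours := [a, r, g, b]
  -- hxc_str = "0x"; for c in colours: hxc_str += _hex_digits(c)
  let hxc_str := colours.foldl (fun s c => s ++ hex_digits_py c) ['0', 'x']
  pvIntBase0Hex hxc_str

-- ===== PORT B =====
def colour_as_hex_py_alt (r : Int) (g : Int) (b : Int) (a : Int) : Int :=
  ((a * 256 + r) * 256 + g) * 256 + b

-- ===== PRECONDITION & SPEC =====
-- A's asserts raise AssertionError unless every component is in [0, 255]
def Pre_colour_as_hex_py (r : Int) (g : Int) (b : Int) (a : Int) : Prop :=
  (0 ≤ r ∧ r ≤ 255) ∧ (0 ≤ g ∧ g ≤ 255) ∧ (0 ≤ b ∧ b ≤ 255) ∧ (0 ≤ a ∧ a ≤ 255)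
instance (r : Int) (g : Int) (b : Int) (a : Int) : Decidable (Pre_colour_as_hex_py r g b a) := by
  unfold Pre_colour_as_hex_py; infer_instance

def pvWitness_colour_as_hex_py : Int × Int × Int × Int := (1, 2, 3, 255)

def Spec_colour_as_hex_py (r : Int) (g : Int) (b : Int) (a : Int) (out : Int) : Prop := out = colour_as_hex_py_alt r g b a
instance (r : Int) (g : Int) (b : Int) (a : Int) (out : Int) : Decidable (Spec_colour_as_hex_py r g b a out) := by unfold Spec_colour_as_hex_py; infer_instance

-- ===== CLAIM (what is proved, stated in full; the proofs are below) =====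
def Claim_equal_colour_as_hex_py : Prop := ∀ (r : Int) (g : Int) (b : Int) (a : Int), Dom_colour_as_hex_py r g b a → Pre_colour_as_hex_py r g b a → Spec_colour_as_hex_py r g b a (colour_as_hex_py r g b a)

-- ===== LEMMAS AND PROOFS =====

set_option maxRecDepth 4000 in
-- the two hex characters _hex_digits produces for a byte
theorem hex_digits_byte : ∀ n : Nat, n < 256 →
    hex_digits_py (n : Int) = [Nat.digitChar (n / 16), Nat.digitChar (n % 16)] := by
  decide

theorem hexVal_digitChar : ∀ m : Nat, m < 16 → pvHexVal (Nat.digitChar m) = (m : Int) := by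
  decide

-- folding one byte's two hex digits onto an accumulator
theorem fold_byte (acc : Int) (n : Nat) (h : n < 256) :
    (hex_digits_py (n : Int)).foldl (fun acc ch => acc * 16 + pvHexVal ch) acc
      = acc * 256 + (n : Int) := by
  rw [hex_digits_byte n h]
  simp only [List.foldl_cons, List.foldl_nil,
    hexVal_digitChar (n / 16) (by omega), hexVal_digitChar (n % 16) (by omega)]
  have := Nat.div_add_mod n 16
  push_cast
  nlinarith [Nat.div_add_mod n 16]

theorem colour_as_hex_py_spec : Claim_equal_colour_as_hex_py := by
  intro r g b a _ hpre
  obtain ⟨⟨hr0, hr1⟩, ⟨hg0, hg1⟩, ⟨hb0, hb1⟩, ⟨ha0, ha1⟩⟩ := hpre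
  unfold Spec_colour_as_hex_py colour_as_hex_py colour_as_hex_py_alt pvIntBase0Hex
  -- replace each Int component by its Nat value
  obtain ⟨nr, rfl⟩ : ∃ n : Nat, r = (n : Int) := ⟨r.toNat, (Int.toNat_of_nonneg hr0).symm⟩
  obtain ⟨ng, rfl⟩ : ∃ n : Nat, g = (n : Int) := ⟨g.toNat, (Int.toNat_of_nonneg hg0).symm⟩
  obtain ⟨nb, rfl⟩ : ∃ n : Nat, b = (n : Int) := ⟨b.toNat, (Int.toNat_of_nonneg hb0).symm⟩
  obtain ⟨na, rfl⟩ : ∃ n : Nat, a = (n : Int) := ⟨a.toNat, (Int.toNat_of_nonneg ha0).symm⟩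
  have hr : nr < 256 := by omega
  have hg : ng < 256 := by omega
  have hb : nb < 256 := by omega
  have ha : na < 256 := by omega
  simp only [List.foldl_cons, List.foldl_nil, List.append_assoc, List.cons_append,
    List.nil_append, List.drop_succ_cons, List.drop_zero, List.foldl_append]
  rw [fold_byte _ _ ha, fold_byte _ _ hr, fold_byte _ _ hg, fold_byte _ _ hb]
  ring

-- Dom ∧ Pre hold at the witness (required with Pre_)
theorem pvWitness_ok :
    Dom_colour_as_hex_py pvWitness_colour_as_hex_py.1 pvWitness_colour_as_hex_py.2.1
      pvWitness_colour_as_hex_py.2.2.1 pvWitness_colour_as_hex_py.2.2.2 ∧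
    Pre_colour_as_hex_py pvWitness_colour_as_hex_py.1 pvWitness_colour_as_hex_py.2.1
      pvWitness_colour_as_hex_py.2.2.1 pvWitness_colour_as_hex_py.2.2.2 := by
  decide
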